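-- pv_equiv track=rewrite | github.com/cmdlab/Hetero2d | hetero2d/manipulate/utils.py | get_trans_matrices
-- ===== SOURCE A (Python) =====
-- def get_trans_matrices(n):
--     """
--     yields a list of 2x2 transformation matrices for the
--     given supercell
--     n: size
--     """
--
--     def factors(n0):
--         for i in range(1, n0 + 1):
--             if n0 % i == 0:
--                 yield i
--
--     for i in factors(n):
--         m = n // i
--         yield [[[i, j], [0, m]] for j in range(m)]
-- ===== SOURCE B (Python) =====
-- def get_trans_matrices(n):
--     """
--     yields a list of 2x2 transformation matrices for the
--     given supercell
--     n: size
--     """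
--     small, large = [], []
--     i = 1
--     while i * i <= n:
--         if n % i == 0:
--             small.append(i)
--             if i * i != n:
--                 large.append(n // i)
--         i += 1
--     for d in small + large[::-1]:
--         m = n // d
--         yield [[[d, j], [0, m]] for j in range(m)]
-- ===== Notes on version B (the rewrite author's own statement) =====
-- stated objective: alternative
-- what changed: Replaces the linear trial division over range(1,n+1) with a sqrt(n) loop collecting each divisor i together with its cofactor n//i into two lists, concatenated (large reversed) to recover ascending order before emitting the matrices; total cost is dominated by the emitted matrices, so it is not measurably faster.
import Mathlib
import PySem

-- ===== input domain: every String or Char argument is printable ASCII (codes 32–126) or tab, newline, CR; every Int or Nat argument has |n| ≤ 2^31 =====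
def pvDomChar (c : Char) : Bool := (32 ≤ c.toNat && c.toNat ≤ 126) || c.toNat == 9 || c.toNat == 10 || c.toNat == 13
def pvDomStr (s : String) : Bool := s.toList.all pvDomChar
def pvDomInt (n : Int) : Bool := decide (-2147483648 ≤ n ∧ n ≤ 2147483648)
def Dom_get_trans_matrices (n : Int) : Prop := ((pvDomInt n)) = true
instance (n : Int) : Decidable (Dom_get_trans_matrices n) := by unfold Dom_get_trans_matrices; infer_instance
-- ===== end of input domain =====

-- B finds divisors by a √n loop over (i, n//i) pairs instead of A's linear trial division over range(1, n+1); same emitted matrices.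


-- ===== PORT A =====
-- inner generator 'factors(n0)': the i in range(1, n0+1) with n0 % i == 0
def pyFactors (n0 : Int) : List Int :=
  (PySem.List.pyRange 1 (n0 + 1) 1).filter (fun i => PySem.Int.mod n0 i == 0)

def get_trans_matrices (n : Int) : List (List (List (List Int))) :=
  (pyFactors n).map (fun i =>
    let m := PySem.Int.floordiv n i
    (PySem.List.pyRange 0 m 1).map (fun j => [[i, j], [0, m]]))

-- ===== PORT B =====
-- B's while loop 'while i*i <= n', returning (small, large) in ascending-i order
def divLoop (n : Int) (i : Nat) : List Int × List Int :=
  if h : (i : Int) * i ≤ n then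
    let rest := divLoop n (i + 1)
    if PySem.Int.mod n i == 0 then
      if (i : Int) * i == n then ((i : Int) :: rest.1, rest.2)
      else ((i : Int) :: rest.1, PySem.Int.floordiv n i :: rest.2)
    else rest
  else ([], [])
termination_by n.toNat + 1 - i
decreasing_by
  have h1 : ((i * i : Nat) : Int) ≤ n := by push_cast; exact h
  have h2 : i * i ≤ n.toNat := by have := Int.toNat_le_toNat h1; rwa [Int.toNat_natCast] at this
  have h3 : i ≤ i * i := by nlinarith
  omega

def get_trans_matrices_alt (n : Int) : List (List (List (List Int))) :=
  let p := divLoop n 1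
  (p.1 ++ p.2.reverse).map (fun d =>
    let m := PySem.Int.floordiv n d
    (PySem.List.pyRange 0 m 1).map (fun j => [[d, j], [0, m]]))

-- ===== PRECONDITION & SPEC =====
def Spec_get_trans_matrices (n : Int) (out : List (List (List (List Int)))) : Prop := out = get_trans_matrices_alt n
instance (n : Int) (out : List (List (List (List Int)))) : Decidable (Spec_get_trans_matrices n out) := by unfold Spec_get_trans_matrices; infer_instance

-- ===== CLAIM (what is proved, stated in full; the proofs are below) =====
def Claim_equal_get_trans_matrices : Prop := ∀ (n : Int), Dom_get_trans_matrices n → Spec_get_trans_matrices n (get_trans_matrices n)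

-- ===== LEMMAS AND PROOFS =====

-- combined loop invariant for B's divisor loop: elements, order, and the split at sqrt(n)
theorem divLoop_inv (n : Int) (i : Nat) : 1 ≤ i →
    (∀ d : Int, d ∈ (divLoop n i).1 ↔ ((i : Int) ≤ d ∧ d * d ≤ n ∧ d ∣ n)) ∧
    (∀ d : Int, d ∈ (divLoop n i).2 ↔ (n < d * d ∧ 0 < d ∧ d * (i : Int) ≤ n ∧ d ∣ n)) ∧
    (divLoop n i).1.Pairwise (· < ·) ∧ (divLoop n i).2.Pairwise (· > ·) := by
  fun_induction divLoop n i
  case case1 i hle rest hmod hsq ih =>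
    simp only [show rest = divLoop n (i + 1) from rfl]
    -- i*i = n, i ∣ n ; result (i :: rest.1, rest.2)
    intro hi
    obtain ⟨ih1, ih2, ih3, ih4⟩ := ih (by omega)
    have hI : (1 : Int) ≤ (i : Int) := by exact_mod_cast hi
    have hdvd : (i : Int) ∣ n := by
      rw [← PySem.Int.mod_eq_zero_iff_dvd]; exact beq_iff_eq.mp hmod
    have hsq' : (i : Int) * i = n := beq_iff_eq.mp hsq
    push_cast at ih1 ih2
    refine ⟨?_, ?_, ?_, ih4⟩
    · intro d
      simp only [List.mem_cons, ih1]
      constructor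
      · rintro (rfl | ⟨h1, h2, h3⟩)
        · exact ⟨le_refl _, le_of_eq hsq', hdvd⟩
        · exact ⟨by omega, h2, h3⟩
      · rintro ⟨h1, h2, h3⟩
        rcases eq_or_lt_of_le h1 with h | h
        · exact Or.inl h.symm
        · exact Or.inr ⟨by omega, h2, h3⟩
    · intro d
      simp only [ih2]
      constructor
      · rintro ⟨h1, h2, h3, h4⟩
        exact ⟨h1, h2, by nlinarith, h4⟩
      · rintro ⟨h1, h2, h3, h4⟩
        obtain ⟨q, hq⟩ := h4
        have hIq : (i : Int) ≤ q := by nlinarith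
        rcases eq_or_lt_of_le hIq with h | h
        · exfalso
          have hdI : d = (i : Int) := by nlinarith
          rw [hdI, hsq'] at h1; exact lt_irrefl _ h1
        · exact ⟨h1, h2, by nlinarith, ⟨q, hq⟩⟩
    · refine List.pairwise_cons.mpr ⟨fun e he => ?_, ih3⟩
      have := (ih1 e).mp he
      omega
  case case2 i hle rest hmod hsq ih =>
    simp only [show rest = divLoop n (i + 1) from rfl]
    -- i*i < n, i ∣ n ; result (i :: rest.1, n//i :: rest.2)
    intro hi
    obtain ⟨ih1, ih2, ih3, ih4⟩ := ih (by omega)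
    have hI : (1 : Int) ≤ (i : Int) := by exact_mod_cast hi
    have hdvd : (i : Int) ∣ n := by
      rw [← PySem.Int.mod_eq_zero_iff_dvd]; exact beq_iff_eq.mp hmod
    have hsq' : (i : Int) * i < n := lt_of_le_of_ne hle (fun h => by simp [h] at hsq)
    have hfd : PySem.Int.floordiv n i = n / (i : Int) :=
      PySem.Int.floordiv_eq_ediv_of_pos (by omega)
    have hc : n / (i : Int) * i = n := Int.ediv_mul_cancel hdvd
    set c : Int := n / (i : Int) with hcdef
    have hci : (i : Int) < c := by nlinarith
    have hcpos : 0 < c := by omega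
    have hcc : n < c * c := by nlinarith
    have hcdvd : c ∣ n := ⟨i, hc.symm⟩
    push_cast at ih1 ih2
    refine ⟨?_, ?_, ?_, ?_⟩
    · intro d
      simp only [List.mem_cons, ih1]
      constructor
      · rintro (rfl | ⟨h1, h2, h3⟩)
        · exact ⟨le_refl _, le_of_lt hsq', hdvd⟩
        · exact ⟨by omega, h2, h3⟩
      · rintro ⟨h1, h2, h3⟩
        rcases eq_or_lt_of_le h1 with h | h
        · exact Or.inl h.symm
        · exact Or.inr ⟨by omega, h2, h3⟩
    · intro d
      simp only [List.mem_cons, hfd, ih2]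
      constructor
      · rintro (rfl | ⟨h1, h2, h3, h4⟩)
        · exact ⟨hcc, hcpos, le_of_eq hc, hcdvd⟩
        · exact ⟨h1, h2, by nlinarith, h4⟩
      · rintro ⟨h1, h2, h3, h4⟩
        obtain ⟨q, hq⟩ := h4
        have hIq : (i : Int) ≤ q := by nlinarith
        rcases eq_or_lt_of_le hIq with h | h
        · left
          have : d * (i : Int) = n := by rw [hq, ← h]
          nlinarith
        · exact Or.inr ⟨h1, h2, by nlinarith, ⟨q, hq⟩⟩
    · refine List.pairwise_cons.mpr ⟨fun e he => ?_, ih3⟩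
      have := (ih1 e).mp he
      omega
    · refine List.pairwise_cons.mpr ⟨fun e he => ?_, ih4⟩
      have := (ih2 e).mp he
      simp only [hfd]
      nlinarith [this.1, this.2.1, this.2.2.1]
  case case3 i hle rest hmod ih =>
    simp only [show rest = divLoop n (i + 1) from rfl]
    -- i ∤ n ; result rest
    intro hi
    obtain ⟨ih1, ih2, ih3, ih4⟩ := ih (by omega)
    have hI : (1 : Int) ≤ (i : Int) := by exact_mod_cast hi
    have hndvd : ¬ ((i : Int) ∣ n) := by
      rw [← PySem.Int.mod_eq_zero_iff_dvd]
      intro h; simp [h] at hmod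
    push_cast at ih1 ih2
    refine ⟨?_, ?_, ih3, ih4⟩
    · intro d
      rw [ih1]
      constructor
      · rintro ⟨h1, h2, h3⟩; exact ⟨by omega, h2, h3⟩
      · rintro ⟨h1, h2, h3⟩
        have hne : d ≠ (i : Int) := fun h => hndvd (h ▸ h3)
        exact ⟨by omega, h2, h3⟩
    · intro d
      rw [ih2]
      constructor
      · rintro ⟨h1, h2, h3, h4⟩; exact ⟨h1, h2, by nlinarith, h4⟩
      · rintro ⟨h1, h2, h3, h4⟩
        obtain ⟨q, hq⟩ := h4
        have hIq : (i : Int) ≤ q := by nlinarith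
        rcases eq_or_lt_of_le hIq with h | h
        · exfalso
          exact hndvd ⟨d, by rw [hq, ← h]; ring⟩
        · exact ⟨h1, h2, by nlinarith, ⟨q, hq⟩⟩
  case case4 i hle =>
    intro hi
    have hI : (1 : Int) ≤ (i : Int) := by exact_mod_cast hi
    rw [not_le] at hle
    refine ⟨?_, ?_, List.Pairwise.nil, List.Pairwise.nil⟩
    · intro d
      simp only [List.not_mem_nil, false_iff]
      rintro ⟨h1, h2, _⟩
      nlinarith
    · intro d
      simp only [List.not_mem_nil, false_iff]
      rintro ⟨h1, h2, h3, _⟩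
      nlinarith

theorem mem_divs (n d : Int) :
    d ∈ (divLoop n 1).1 ++ (divLoop n 1).2.reverse ↔ (1 ≤ d ∧ d ≤ n ∧ d ∣ n) := by
  obtain ⟨h1, h2, _, _⟩ := divLoop_inv n 1 le_rfl
  simp only [List.mem_append, List.mem_reverse, h1, h2]
  push_cast
  constructor
  · rintro (⟨ha, hb, hc⟩ | ⟨ha, hb, hc, hd⟩)
    · exact ⟨ha, by nlinarith, hc⟩
    · exact ⟨hb, by omega, hd⟩
  · rintro ⟨ha, hb, hc⟩
    rcases le_or_gt (d * d) n with h | h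
    · exact Or.inl ⟨ha, h, hc⟩
    · exact Or.inr ⟨h, by omega, by omega, hc⟩

theorem pairwise_divs (n : Int) :
    ((divLoop n 1).1 ++ (divLoop n 1).2.reverse).Pairwise (· < ·) := by
  obtain ⟨h1, h2, h3, h4⟩ := divLoop_inv n 1 le_rfl
  rw [List.pairwise_append]
  refine ⟨h3, List.pairwise_reverse.mpr h4, ?_⟩
  intro a ha b hb
  rw [List.mem_reverse] at hb
  obtain ⟨_, ha2, _⟩ := (h1 a).mp ha
  obtain ⟨hb1, hb2, _, _⟩ := (h2 b).mp hb
  nlinarith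

theorem mem_pyFactors (n d : Int) : d ∈ pyFactors n ↔ (1 ≤ d ∧ d ≤ n ∧ d ∣ n) := by
  simp only [pyFactors, List.mem_filter, PySem.List.mem_pyRange_one, beq_iff_eq,
    PySem.Int.mod_eq_zero_iff_dvd]
  omega

theorem divs_eq_pyFactors (n : Int) :
    (divLoop n 1).1 ++ (divLoop n 1).2.reverse = pyFactors n := by
  have hnd1 : ((divLoop n 1).1 ++ (divLoop n 1).2.reverse).Nodup :=
    (pairwise_divs n).imp ne_of_lt
  have hnd2 : (pyFactors n).Nodup :=
    (PySem.List.nodup_pyRange_one 1 (n+1)).filter _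
  have hperm : ((divLoop n 1).1 ++ (divLoop n 1).2.reverse).Perm (pyFactors n) :=
    (List.perm_ext_iff_of_nodup hnd1 hnd2).mpr (fun a => by rw [mem_divs, mem_pyFactors])
  refine hperm.eq_of_pairwise ?_ (pairwise_divs n) ?_
  · exact fun a b _ _ h1 h2 => absurd h2 (asymm h1)
  · exact List.Pairwise.filter _ (PySem.List.pairwise_lt_pyRange_one 1 (n+1))

-- ===== VERDICT (by name: the statement is the Claim_ definition above) =====
theorem get_trans_matrices_spec : Claim_equal_get_trans_matrices := by
  intro n _
  show get_trans_matrices n = get_trans_matrices_alt n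
  simp only [get_trans_matrices, get_trans_matrices_alt]
  rw [divs_eq_pyFactors]
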